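-- pv_equiv track=rewrite | github.com/maxiwebs/CorsiBot | scripts/protocolos/mayoresDiferencias.py | cantRepetidos
-- ===== SOURCE A (Python) =====
-- def cantRepetidos(seq1,seq2):
--     letters = list(seq1)
--     repeticiones = 0
--
--     for letter in letters:
--         apariciones = (str(seq2)).count(letter)
--         if apariciones > 1:
--             repeticiones+=apariciones
--
--     return repeticiones
-- ===== SOURCE B (Python) =====
-- def cantRepetidos(seq1, seq2):
--     # Stage 1: frequency table of seq1's elements; Stage 2: count each distinct
--     # element in str(seq2) ONCE and add count * multiplicity.
--     s = str(seq2)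
--     freq = {}
--     for letter in seq1:
--         freq[letter] = freq.get(letter, 0) + 1
--     total = 0
--     for letter, mult in freq.items():
--         c = s.count(letter)
--         if c > 1:
--             total += c * mult
--     return total
-- ===== Notes on version B (the rewrite author's own statement) =====
-- stated objective: faster
-- what changed: B first builds a frequency dict of seq1 in one pass, then iterates over the dict's (letter, multiplicity) items, counting each distinct letter in str(seq2) once and adding count * multiplicity, instead of rescanning seq2 for every occurrence.
import Mathlib
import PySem

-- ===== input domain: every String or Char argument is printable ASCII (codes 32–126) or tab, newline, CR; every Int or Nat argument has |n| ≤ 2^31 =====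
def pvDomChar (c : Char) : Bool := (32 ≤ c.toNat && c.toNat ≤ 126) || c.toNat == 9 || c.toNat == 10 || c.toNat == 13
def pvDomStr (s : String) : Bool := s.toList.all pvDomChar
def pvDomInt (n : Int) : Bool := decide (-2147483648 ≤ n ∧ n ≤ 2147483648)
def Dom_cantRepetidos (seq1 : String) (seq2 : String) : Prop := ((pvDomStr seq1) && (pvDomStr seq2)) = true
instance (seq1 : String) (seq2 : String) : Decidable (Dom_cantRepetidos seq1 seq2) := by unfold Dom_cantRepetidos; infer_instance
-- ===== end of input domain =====

-- B replaces A's per-occurrence rescan of seq2 by two staged passes: build a frequency dict of seq1, then count each distinct letter in seq2 once, weighted by its multiplicity.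

-- ===== PORT A =====
-- for letter in list(seq1): apariciones = str(seq2).count(letter); if apariciones > 1: repeticiones += apariciones
def cantRepetidos (seq1 : String) (seq2 : String) : Int :=
  let letters := seq1.toList
  letters.foldl (fun repeticiones letter =>
    let apariciones := PySem.Chars.count seq2.toList [letter]
    if apariciones > 1 then repeticiones + (apariciones : Int) else repeticiones) 0

-- ===== PORT B =====
-- freq = {}; for letter in seq1: freq[letter] = freq.get(letter, 0) + 1
-- for letter, mult in freq.items(): c = s.count(letter); if c > 1: total += c * mult
def cantRepetidos_alt (seq1 : String) (seq2 : String) : Int :=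
  let s := seq2.toList
  let freq : PySem.Dict Char Int :=
    seq1.toList.foldl (fun d letter => d.insert letter (d.getD letter 0 + 1)) PySem.Dict.empty
  freq.items.foldl (fun total kv =>
    let c := PySem.Chars.count s [kv.1]
    if c > 1 then total + (c : Int) * kv.2 else total) 0

-- ===== PRECONDITION & SPEC =====
def Spec_cantRepetidos (seq1 : String) (seq2 : String) (out : Int) : Prop := out = cantRepetidos_alt seq1 seq2
instance (seq1 : String) (seq2 : String) (out : Int) : Decidable (Spec_cantRepetidos seq1 seq2 out) := by unfold Spec_cantRepetidos; infer_instance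

-- ===== CLAIM (what is proved, stated in full; the proofs are below) =====
def Claim_equal_cantRepetidos : Prop := ∀ (seq1 : String) (seq2 : String), Dom_cantRepetidos seq1 seq2 → Spec_cantRepetidos seq1 seq2 (cantRepetidos seq1 seq2)

-- ===== LEMMAS AND PROOFS =====

-- Regrouping a sum over a list as a sum over its distinct elements weighted by multiplicity.
theorem sum_map_eq_sum_dedup_count_mul (l : List Char) (f : Char → Int) :
    (l.map f).sum = ((PySem.List.dedup l).map (fun x => (l.count x : Int) * f x)).sum := by
  rw [Finset.sum_list_map_count, Finset.sum_list_map_count]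
  have hnd := PySem.List.nodup_dedup l
  have hfs : (PySem.List.dedup l).toFinset = l.toFinset := by
    ext x; simp
  rw [hfs]
  refine Finset.sum_congr rfl (fun x hx => ?_)
  rw [List.count_eq_one_of_mem hnd (by simpa [PySem.List.mem_dedup] using List.mem_toFinset.mp hx)]
  simp [mul_comm]

-- ===== VERDICT (by name: the statement is the Claim_ definition above) =====
theorem cantRepetidos_spec : Claim_equal_cantRepetidos := by
  intro seq1 seq2 _
  unfold Spec_cantRepetidos cantRepetidos cantRepetidos_alt
  set l := seq1.toList
  set g : Char → Nat := fun x => PySem.Chars.count seq2.toList [x] with hg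
  set f : Char → Int := fun x => if g x > 1 then (g x : Int) else 0 with hf
  -- B's dict-building loop is Counter(seq1); its items are the distinct letters with their counts
  simp only [PySem.Dict.foldl_insert_getD_add_one_eq_counter, PySem.Dict.items_counter]
  have hA : l.foldl (fun rep letter =>
      if g letter > 1 then rep + (g letter : Int) else rep) 0 = 0 + (l.map f).sum := by
    rw [PySem.List.foldl_congr_mem l _ (fun acc x => acc + f x) 0
        (by intro acc x _; simp [hf]; split <;> simp)]
    exact PySem.List.foldl_add l f 0
  have hB : ((PySem.Set.ofList l).map (fun k => (k, (l.count k : Int)))).foldl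
      (fun total kv => if g kv.1 > 1 then total + (g kv.1 : Int) * kv.2 else total) 0
      = 0 + ((PySem.List.dedup l).map (fun x => (l.count x : Int) * f x)).sum := by
    rw [List.foldl_map]
    rw [PySem.List.foldl_congr_mem _ _ (fun acc x => acc + (l.count x : Int) * f x) 0
        (by intro acc x _; simp [hf]; split <;> simp [mul_comm])]
    rw [← PySem.List.dedup_eq_ofList]
    exact PySem.List.foldl_add _ _ 0
  rw [hA, hB, zero_add, zero_add]
  exact sum_map_eq_sum_dedup_count_mul l f
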